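-- pv_equiv track=rewrite | github.com/DamianHuerta/Gatech-CS-CourseWork | CS-1301-Python/HW03.py | crazy_scrabble
-- ===== SOURCE A (Python) =====
-- def crazy_scrabble(string, integer, boolean):
--     count = integer
--     used = ""
--     newcount = 0
--     for letter in string:
--         if letter in used:
--             newcount -= 1
--
--         if letter in "kmpxyz":
--             newcount += 7
--             used += letter
--         elif letter in "cs":
--             newcount += 4
--             used += letter
--         elif letter in "aeiou":
--             newcount -= 2
--             used += letter
--         else:
--             newcount +=1
--             used += letter
--     if len(string) > 6:
--         newcount += 3
--     if boolean and newcount > 0: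
--             newcount= newcount* 2
--     totalpoints= count + newcount
--     if totalpoints < 0:
--         return 0
--     else:
--         return totalpoints
-- ===== SOURCE B (Python) =====
-- def crazy_scrabble(string, integer, boolean):
--     # phase 1: frequency table of letters
--     freq = {}
--     for c in string:
--         freq[c] = freq.get(c, 0) + 1
--     # phase 2: one term per DISTINCT letter: category score times its count,
--     # minus the repeat penalty (count - 1) for that letter
--     newcount = 0
--     for c, k in freq.items():
--         if c in "kmpxyz":
--             s = 7
--         elif c in "cs":
--             s = 4
--         elif c in "aeiou":
--             s = -2
--         else:
--             s = 1
--         newcount += s * k - (k - 1)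
--     if len(string) > 6:
--         newcount += 3
--     if boolean and newcount > 0:
--         newcount *= 2
--     return max(integer + newcount, 0)
-- ===== Notes on version B (the rewrite author's own statement) =====
-- stated objective: faster
-- what changed: Replaces A's single per-character loop that tracks a growing 'used' string (quadratic membership test for the repeat penalty) by a two-phase counter algorithm: first build a letter-frequency dict in one pass, then loop over the distinct letters scoring category_score*count minus the repeat penalty (count-1) per letter; the trailing bonus/doubling/clamp logic is unchanged.
import Mathlib
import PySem

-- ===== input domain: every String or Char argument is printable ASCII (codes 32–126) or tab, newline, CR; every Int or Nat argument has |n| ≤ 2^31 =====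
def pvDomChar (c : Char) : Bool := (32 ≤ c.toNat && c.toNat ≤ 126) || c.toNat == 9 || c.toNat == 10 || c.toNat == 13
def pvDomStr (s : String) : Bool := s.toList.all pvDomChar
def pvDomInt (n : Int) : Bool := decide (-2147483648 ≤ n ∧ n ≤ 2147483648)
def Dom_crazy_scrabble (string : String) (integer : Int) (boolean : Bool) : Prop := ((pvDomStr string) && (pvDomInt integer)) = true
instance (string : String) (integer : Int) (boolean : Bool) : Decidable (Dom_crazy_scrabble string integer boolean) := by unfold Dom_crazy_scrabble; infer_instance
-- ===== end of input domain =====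

-- B replaces A's per-character loop over a growing 'used' string by a two-phase counter:
-- build a letter-frequency dict, then score each DISTINCT letter once from its count; objective: faster.

-- ===== PORT A =====
-- one loop iteration of A: state is (used, newcount); every branch appends letter to used
def pvStepA (s : List Char × Int) (letter : Char) : List Char × Int :=
  let used := s.1
  let newcount := s.2
  let newcount := if used.contains letter then newcount - 1 else newcount
  if ['k','m','p','x','y','z'].contains letter then (used ++ [letter], newcount + 7)
  else if ['c','s'].contains letter then (used ++ [letter], newcount + 4)
  else if ['a','e','i','o','u'].contains letter then (used ++ [letter], newcount - 2)
  else (used ++ [letter], newcount + 1)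

def crazy_scrabble (string : String) (integer : Int) (boolean : Bool) : Int :=
  let count := integer
  let st := string.toList.foldl pvStepA ([], 0)
  let newcount := st.2
  let newcount := if (string.toList.length : Int) > 6 then newcount + 3 else newcount
  let newcount := if boolean && decide (newcount > 0) then newcount * 2 else newcount
  let totalpoints := count + newcount
  if totalpoints < 0 then 0 else totalpoints

-- ===== PORT B =====
-- the per-distinct-letter term of Source B's second loop: s * k - (k - 1)
def pvTermB (acc : Int) (p : Char × Int) : Int :=
  let s : Int :=
    if ['k','m','p','x','y','z'].contains p.1 then 7
    else if ['c','s'].contains p.1 then 4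
    else if ['a','e','i','o','u'].contains p.1 then -2
    else 1
  acc + (s * p.2 - (p.2 - 1))

def crazy_scrabble_alt (string : String) (integer : Int) (boolean : Bool) : Int :=
  let l := string.toList
  -- phase 1: freq[c] = freq.get(c, 0) + 1
  let freq : PySem.Dict Char Int := l.foldl (fun d c => d.modify c 0 (· + 1)) PySem.Dict.empty
  -- phase 2: loop over the dict's items
  let newcount := freq.items.foldl pvTermB 0
  let newcount := if (l.length : Int) > 6 then newcount + 3 else newcount
  let newcount := if boolean && decide (newcount > 0) then newcount * 2 else newcount
  max (integer + newcount) 0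

-- ===== PRECONDITION & SPEC =====
def Spec_crazy_scrabble (string : String) (integer : Int) (boolean : Bool) (out : Int) : Prop := out = crazy_scrabble_alt string integer boolean
instance (string : String) (integer : Int) (boolean : Bool) (out : Int) : Decidable (Spec_crazy_scrabble string integer boolean out) := by unfold Spec_crazy_scrabble; infer_instance

-- ===== CLAIM (what is proved, stated in full; the proofs are below) =====
def Claim_equal_crazy_scrabble : Prop := ∀ (string : String) (integer : Int) (boolean : Bool), Dom_crazy_scrabble string integer boolean → Spec_crazy_scrabble string integer boolean (crazy_scrabble string integer boolean)

-- ===== LEMMAS AND PROOFS =====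

def category_score (c : Char) : Int :=
  if ['k','m','p','x','y','z'].contains c then 7
  else if ['c','s'].contains c then 4
  else if ['a','e','i','o','u'].contains c then -2
  else 1

-- number of repeat hits A's loop charges on l when the letters of p were already seen
def pvRep : List Char → List Char → Int
  | _, [] => 0
  | p, c :: t => (if p.contains c then 1 else 0) + pvRep (p ++ [c]) t

lemma pvStepA_char (p : List Char) (n : Int) (c : Char) :
    pvStepA (p, n) c = (p ++ [c], n + category_score c - (if p.contains c then 1 else 0)) := by
  simp only [pvStepA, category_score]
  split_ifs <;> simp_all <;> ring

lemma foldA_char (l : List Char) : ∀ (p : List Char) (n : Int),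
    l.foldl pvStepA (p, n) = (p ++ l, n + (l.map category_score).sum - pvRep p l) := by
  induction l with
  | nil => intro p n; simp [pvRep]
  | cons c t ih =>
      intro p n
      simp only [List.foldl_cons, pvStepA_char, ih, pvRep, List.map_cons, List.sum_cons,
        Prod.mk.injEq]
      refine ⟨by simp, by ring⟩

lemma pvRep_card (l : List Char) : ∀ (p : List Char),
    pvRep p l = (l.length : Int)
      - ((((p ++ l).toFinset.card : Int)) - (p.toFinset.card : Int)) := by
  induction l with
  | nil => intro p; simp [pvRep]
  | cons c t ih =>
      intro p
      have assoc : p ++ c :: t = (p ++ [c]) ++ t := by simp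
      by_cases h : c ∈ p
      · have hc : p.contains c = true := by simpa using h
        have hcard : (p ++ [c]).toFinset.card = p.toFinset.card := by
          simp [List.toFinset_append, Finset.insert_eq_self.mpr (List.mem_toFinset.mpr h)]
        simp only [pvRep, hc, ih, assoc, hcard, List.length_cons]
        push_cast
        ring
      · have hc : p.contains c = false := by simpa using h
        have hcard : (p ++ [c]).toFinset.card = p.toFinset.card + 1 := by
          simp [List.toFinset_append,
            Finset.card_insert_of_notMem (fun hm => h (List.mem_toFinset.mp hm))]
        simp only [pvRep, hc, ih, assoc, hcard, List.length_cons]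
        push_cast
        ring

-- A's accumulated newcount, in Finset form
lemma newcountA_eq (l : List Char) :
    (l.foldl pvStepA ([], 0)).2
      = (l.map category_score).sum - ((l.length : Int) - (l.toFinset.card : Int)) := by
  rw [foldA_char, pvRep_card]
  simp

-- B's dict loop, in Finset form
lemma foldl_pvTermB (xs : List (Char × Int)) : ∀ (a : Int),
    xs.foldl pvTermB a
      = a + (xs.map (fun p => category_score p.1 * p.2 - (p.2 - 1))).sum := by
  induction xs with
  | nil => intro a; simp
  | cons p t ih =>
      intro a
      simp only [List.foldl_cons, List.map_cons, List.sum_cons, ih, pvTermB, category_score]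
      ring

lemma newcountB_eq (l : List Char) :
    ((l.foldl (fun d c => d.modify c 0 (· + 1)) PySem.Dict.empty :
        PySem.Dict Char Int).items.foldl pvTermB 0)
      = ∑ c ∈ l.toFinset, (category_score c * (l.count c : Int) - ((l.count c : Int) - 1)) := by
  have hc : (l.foldl (fun d c => d.modify c 0 (· + 1)) PySem.Dict.empty : PySem.Dict Char Int)
      = PySem.Dict.counter l := (PySem.Dict.counter_eq_foldl l).symm
  have hfin : (PySem.Set.ofList l).toFinset = l.toFinset := by
    ext x; simp [List.mem_toFinset, PySem.Set.mem_ofList]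
  rw [hc, PySem.Dict.items_counter, foldl_pvTermB, List.map_map]
  rw [← List.sum_toFinset _ (PySem.Set.nodup_ofList l), hfin]
  simp [Function.comp]

-- the two accumulated newcounts agree
lemma newcount_eq (l : List Char) :
    (l.foldl pvStepA ([], 0)).2
      = ((l.foldl (fun d c => d.modify c 0 (· + 1)) PySem.Dict.empty :
          PySem.Dict Char Int).items.foldl pvTermB 0) := by
  rw [newcountA_eq, newcountB_eq]
  rw [Finset.sum_list_map_count l category_score]
  have hlen : ∑ m ∈ l.toFinset, (l.count m : ℤ) = (l.length : ℤ) := by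
    simpa using (Finset.sum_list_map_count l (fun _ => (1:ℤ))).symm
  rw [Finset.sum_sub_distrib, Finset.sum_sub_distrib, Finset.sum_const, hlen]
  have h1 : ∑ m ∈ l.toFinset, l.count m • category_score m
      = ∑ m ∈ l.toFinset, category_score m * (l.count m : ℤ) :=
    Finset.sum_congr rfl (fun x _ => by rw [nsmul_eq_mul, mul_comm])
  rw [h1]
  ring

-- ===== VERDICT (by name: the statement is the Claim_ definition above) =====
theorem crazy_scrabble_spec : Claim_equal_crazy_scrabble := by
  intro string integer boolean _
  simp only [Spec_crazy_scrabble, crazy_scrabble, crazy_scrabble_alt, newcount_eq]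
  split_ifs <;> omega
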